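-- pv_equiv track=rewrite | github.com/NSI-Termianle-2021-2022/NSI-Premiere | Theme D/DM_pyramide/jin_thomas__varga_sacha.py | last_floor
-- ===== SOURCE A (Python) =====
-- def last_floor(n : int) -> str: # Recupere le dernier etage de la pyramide pour pouvoir definir le nombre d'espace
--     additional_floor = 0
--     stars_increase = 1
--     last_floor = ""
--     for i in range(1, n+1):
--         for k in range(0, 3+additional_floor):
--             last_floor = ("/") + ("*"*stars_increase) + ("\\") + ("\n")
--             stars_increase += 2
--         additional_floor += 1
--         if i < 3 :
--             stars_increase += 4
--         else :
--             stars_increase += 6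
--     return last_floor
-- ===== SOURCE B (Python) =====
-- def last_floor(n: int) -> str:
--     # Closed-form star count of the final floor; O(len(result)) instead of O(n^2) loop work.
--     if n <= 0:
--         return ""
--     stars = n * n + (9 * n - 5 if n < 3 else 11 * n - 11)
--     return "/" + "*" * stars + "\\\n"
-- ===== Notes on version B (the rewrite author's own statement) =====
-- stated objective: faster
-- what changed: Replaces the O(n^2)-iteration nested loops (which rebuild the floor string every inner step) by a closed-form formula for the final star count (n*n + 9n-5 for n<3, n*n + 11n-11 for n>=3) and builds the result string once.
import Mathlib
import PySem

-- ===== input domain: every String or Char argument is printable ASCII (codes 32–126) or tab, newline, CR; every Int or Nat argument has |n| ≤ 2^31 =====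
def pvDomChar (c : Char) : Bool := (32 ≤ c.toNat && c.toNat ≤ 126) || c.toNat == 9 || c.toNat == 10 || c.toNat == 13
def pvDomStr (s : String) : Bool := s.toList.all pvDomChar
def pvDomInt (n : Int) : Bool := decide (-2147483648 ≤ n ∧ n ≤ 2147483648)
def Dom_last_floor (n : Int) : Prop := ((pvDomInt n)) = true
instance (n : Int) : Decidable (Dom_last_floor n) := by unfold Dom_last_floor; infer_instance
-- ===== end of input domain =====

-- B replaces A's nested loops by a closed-form star count and builds the single result string once.

-- ===== PORT A =====
-- "/" + "*"*si + "\" + "\n"  (Python str*int: negative count gives "", matched by Int.toNat)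
def pvMkFloor (si : Int) : String :=
  String.mk (['/'] ++ List.replicate si.toNat '*' ++ ['\\'] ++ ['\n'])

-- the inner 'for k in range(0, 3+additional_floor)' loop over state (stars_increase, last_floor)
def pvInner (si : Int) (lf : String) (af : Int) : Int × String :=
  (PySem.List.pyRange 0 (3 + af) 1).foldl
    (fun (p : Int × String) _k => (p.1 + 2, pvMkFloor p.1)) (si, lf)

-- one iteration of the outer loop on state (additional_floor, stars_increase, last_floor)
def pvOuterStep (st : Int × Int × String) (i : Int) : Int × Int × String :=
  match pvInner st.2.1 st.2.2 st.1 with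
  | (si2, lf2) => (st.1 + 1, (if i < 3 then si2 + 4 else si2 + 6), lf2)

def last_floor (n : Int) : String :=
  ((PySem.List.pyRange 1 (n + 1) 1).foldl pvOuterStep ((0 : Int), (1 : Int), "")).2.2

-- ===== PORT B =====
def last_floor_alt (n : Int) : String :=
  if n ≤ 0 then ""
  else
    String.mk ('/' :: (List.replicate (n * n + (if n < 3 then 9 * n - 5 else 11 * n - 11)).toNat '*'
      ++ ['\\', '\n']))

-- ===== PRECONDITION & SPEC =====
def Spec_last_floor (n : Int) (out : String) : Prop := out = last_floor_alt n
instance (n : Int) (out : String) : Decidable (Spec_last_floor n out) := by unfold Spec_last_floor; infer_instance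

-- ===== CLAIM (what is proved, stated in full; the proofs are below) =====
def Claim_equal_last_floor : Prop := ∀ (n : Int), Dom_last_floor n → Spec_last_floor n (last_floor n)

-- ===== LEMMAS AND PROOFS =====

-- spec state of A's outer loop after m iterations: stars_increase and last_floor
def pvS : Nat → Int
  | 0 => 1
  | m+1 => pvS m + 2 * ((m : Int) + 3) + (if ((m : Int) + 1) < 3 then 4 else 6)

def pvL : Nat → String
  | 0 => ""
  | m+1 => pvMkFloor (pvS m + 2 * ((m : Int) + 2))

lemma pv_inner_list (l : List Int) : ∀ (si : Int) (lf : String),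
    l.foldl (fun (p : Int × String) _k => (p.1 + 2, pvMkFloor p.1)) (si, lf)
      = (si + 2 * l.length, if l.length = 0 then lf else pvMkFloor (si + 2 * ((l.length : Int) - 1))) := by
  induction l with
  | nil => intro si lf; simp
  | cons a l ih =>
    intro si lf
    rw [List.foldl_cons, ih]
    by_cases h : l.length = 0
    · refine Prod.ext ?_ ?_ <;> simp [h]
    · have hl : (1 : Int) ≤ l.length := by exact_mod_cast Nat.one_le_iff_ne_zero.mpr h
      refine Prod.ext ?_ ?_ <;> simp [h]
      · ring
      · congr 1; omega

lemma pvInner_eq (af : Int) (haf : 0 ≤ af) (si : Int) (lf : String) :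
    pvInner si lf af = (si + 2 * (3 + af), pvMkFloor (si + 2 * (2 + af))) := by
  unfold pvInner
  rw [pv_inner_list]
  have hlen : ((PySem.List.pyRange 0 (3 + af) 1).length : Int) = 3 + af := by
    rw [PySem.List.length_pyRange_one]; omega
  have hne : (PySem.List.pyRange 0 (3 + af) 1).length ≠ 0 := by omega
  rw [if_neg hne]
  refine Prod.ext ?_ ?_ <;> simp
  · omega
  · congr 1
    omega

lemma pv_outer (m : Nat) :
    (PySem.List.pyRange 1 ((m : Int) + 1) 1).foldl pvOuterStep ((0 : Int), (1 : Int), "")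
      = ((m : Int), pvS m, pvL m) := by
  induction m with
  | zero => simp [PySem.List.pyRange_one_eq_nil, pvS, pvL]
  | succ m ih =>
    have hsplit : PySem.List.pyRange 1 ((m : Int) + 1 + 1) 1
        = PySem.List.pyRange 1 ((m : Int) + 1) 1 ++ [(m : Int) + 1] :=
      PySem.List.pyRange_one_succ_right (a := 1) (b := (m : Int) + 1) (by omega)
    push_cast [hsplit, List.foldl_append, ih]
    rw [List.foldl_cons, List.foldl_nil]
    unfold pvOuterStep
    rw [pvInner_eq (m : Int) (by omega)]
    refine Prod.ext rfl (Prod.ext ?_ ?_)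
    · show _ = pvS (m + 1)
      rw [pvS]
      by_cases h : ((m : Int) + 1) < 3 <;> simp [h] <;> ring
    · show _ = pvL (m + 1)
      rw [pvL]
      simp
      congr 1; ring

lemma pvS_closed (m : Nat) : pvS m = if m = 0 then 1 else if m = 1 then 11
    else (m : Int) * m + 11 * m - 3 := by
  induction m with
  | zero => simp [pvS]
  | succ m ih =>
    rw [pvS, ih]
    rcases m with _ | _ | m
    · norm_num
    · norm_num
    · rw [if_neg (show ¬ (((m+1+1 : Nat) : Int) + 1 < 3) by push_cast; omega)]
      rw [if_neg (by omega), if_neg (by omega), if_neg (by omega), if_neg (by omega)]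
      push_cast; ring

-- ===== VERDICT (by name: the statement is the Claim_ definition above) =====
theorem last_floor_spec : Claim_equal_last_floor := by
  intro n _
  unfold Spec_last_floor last_floor last_floor_alt
  by_cases hn : n ≤ 0
  · have h0 : PySem.List.pyRange 1 (n + 1) 1 = [] :=
      PySem.List.pyRange_one_eq_nil (by omega)
    simp [h0, hn]
  · obtain ⟨m, rfl⟩ : ∃ m : Nat, n = (m : Int) + 1 := ⟨(n - 1).toNat, by omega⟩
    have hout := pv_outer (m + 1)
    push_cast at hout
    rw [hout, if_neg hn]
    show pvL (m + 1) = _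
    rw [pvL, pvMkFloor]
    have harg : pvS m + 2 * ((m : Int) + 2)
        = ((m : Int) + 1) * ((m : Int) + 1)
          + (if (m : Int) + 1 < 3 then 9 * ((m : Int) + 1) - 5 else 11 * ((m : Int) + 1) - 11) := by
      rw [pvS_closed]
      rcases m with _ | _ | m
      · norm_num
      · norm_num
      · rw [if_neg (show ¬ (((m+1+1 : Nat) : Int) + 1 < 3) by push_cast; omega)]
        rw [if_neg (by omega), if_neg (by omega)]
        push_cast; ring
    rw [harg]
    simp
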